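-- pv_equiv track=rewrite | github.com/Blair-Johnson/DRUM | src/rule_extraction.py | format_prolog_rule
-- ===== SOURCE A (Python) =====
-- def format_prolog_rule(head_relation, body_atoms):
--     """
--     Format a rule in Prolog syntax.
--
--     Args:
--         head_relation: The head predicate (target relation)
--         body_atoms: List of body predicates/atoms
--
--     Returns:
--         String representing the rule in Prolog format
--     """
--     if not body_atoms:
--         return f"{head_relation}(X,Y)."
--
--     # Single atom: relation(X,Y) :- atom(X,Y).
--     if len(body_atoms) == 1:
--         atom = body_atoms[0]
--         if atom.startswith('inv_'):
--             return f"{head_relation}(X,Y) :- {atom[4:]}(Y,X)."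
--         else:
--             return f"{head_relation}(X,Y) :- {atom}(X,Y)."
--
--     # Multiple atoms: need intermediate variables
--     # relation(X,Y) :- atom1(X,Z), atom2(Z,Y).  for 2 atoms
--     # relation(X,Y) :- atom1(X,Z), atom2(Z,W), atom3(W,Y).  for 3 atoms
--     # Variables: X, Z, W, V, U, ..., Y
--     # That's: X, chr(90)=Z, chr(91)=W, chr(92)=V, ..., Y
--
--     body_parts = []
--
--     for i, atom in enumerate(body_atoms):
--         # Current variable
--         if i == 0:
--             current_var = 'X'
--         else:
--             # Z, W, V, U, T, S, R, Q, P, O, ...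
--             # Start from 'Z' (ord 90)
--             current_var = chr(90 + i - 1)
--
--         # Next variable
--         if i == len(body_atoms) - 1:
--             next_var = 'Y'
--         else:
--             # Next intermediate: Z, W, V, ...
--             next_var = chr(90 + i)
--
--         # Handle inverse relations
--         if atom.startswith('inv_'):
--             # For inverse, swap the variables
--             body_parts.append(f"{atom[4:]}({next_var},{current_var})")
--         else:
--             body_parts.append(f"{atom}({current_var},{next_var})")
--
--     body_str = ', '.join(body_parts)
--     return f"{head_relation}(X,Y) :- {body_str}."
-- ===== SOURCE B (Python) =====
-- def format_prolog_rule(head_relation, body_atoms):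
--     out = head_relation + "(X,Y)"
--     if body_atoms:
--         out += " :- "
--         cur, code = 'X', 90
--         prev = body_atoms[0]
--         for atom in body_atoms[1:]:
--             nxt = chr(code)
--             out += f"{prev[4:]}({nxt},{cur}), " if prev.startswith('inv_') else f"{prev}({cur},{nxt}), "
--             cur, code, prev = nxt, code + 1, atom
--         out += f"{prev[4:]}(Y,{cur})" if prev.startswith('inv_') else f"{prev}({cur},Y)"
--     return out + "."
-- ===== Notes on version B (the rewrite author's own statement) =====
-- stated objective: alternative
-- what changed: Replaces A's three-way case split, index-driven enumerate loop with per-iteration conditional variable computation, and parts-list-plus-join by a single index-free lag-one pass that threads the current variable name and char code as loop state and appends each literal directly to one output string; the single-atom case falls out of the final-emit step.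
import Mathlib
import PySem

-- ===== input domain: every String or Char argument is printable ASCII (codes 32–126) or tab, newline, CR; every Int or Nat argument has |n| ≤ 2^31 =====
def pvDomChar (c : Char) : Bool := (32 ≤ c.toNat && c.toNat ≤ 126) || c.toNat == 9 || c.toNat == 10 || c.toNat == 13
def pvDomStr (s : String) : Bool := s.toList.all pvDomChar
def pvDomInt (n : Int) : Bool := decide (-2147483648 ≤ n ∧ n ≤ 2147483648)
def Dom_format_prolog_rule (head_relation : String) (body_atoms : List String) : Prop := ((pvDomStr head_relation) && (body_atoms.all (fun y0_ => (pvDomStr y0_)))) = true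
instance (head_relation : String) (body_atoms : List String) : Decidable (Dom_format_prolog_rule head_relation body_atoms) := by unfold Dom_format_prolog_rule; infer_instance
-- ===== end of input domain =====

-- B replaces A's case split + index-driven loop + join by one recursion that threads the
-- current variable and next char code, building the body string directly (alternative decomposition).

-- ===== PORT A =====
def format_prolog_rule (head_relation : String) (body_atoms : List String) : String :=
  if body_atoms = [] then head_relation ++ "(X,Y)."
  else if body_atoms.length = 1 then
    let atom := body_atoms.headD ""
    if PySem.Str.startswith atom "inv_" then
      head_relation ++ "(X,Y) :- " ++ PySem.Str.slice atom (some 4) none ++ "(Y,X)."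
    else
      head_relation ++ "(X,Y) :- " ++ atom ++ "(X,Y)."
  else
    let body_parts := (PySem.List.enumerate body_atoms).foldl (fun acc p =>
      let i := p.1
      let atom := p.2
      let current_var := if i = 0 then "X" else String.ofList [Char.ofNat (90 + i - 1).toNat]
      let next_var := if i = (body_atoms.length : Int) - 1 then "Y"
                      else String.ofList [Char.ofNat (90 + i).toNat]
      if PySem.Str.startswith atom "inv_" then
        acc ++ [PySem.Str.slice atom (some 4) none ++ "(" ++ next_var ++ "," ++ current_var ++ ")"]
      else
        acc ++ [atom ++ "(" ++ current_var ++ "," ++ next_var ++ ")"]) []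
    let body_str := PySem.Str.join ", " body_parts
    head_relation ++ "(X,Y) :- " ++ body_str ++ "."

-- ===== PORT B =====
-- the loop body of Source B: state (out, cur, code, prev); emits prev's literal and shifts the lag
def pvStep (st : String × String × Nat × String) (atom : String) : String × String × Nat × String :=
  let out := st.1
  let cur := st.2.1
  let code := st.2.2.1
  let prev := st.2.2.2
  let nxt := String.ofList [Char.ofNat code]
  let out := out ++ (if PySem.Str.startswith prev "inv_" then
      PySem.Str.slice prev (some 4) none ++ "(" ++ nxt ++ "," ++ cur ++ "), "
    else prev ++ "(" ++ cur ++ "," ++ nxt ++ "), ")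
  (out, nxt, code + 1, atom)

def format_prolog_rule_alt (head_relation : String) (body_atoms : List String) : String :=
  let out := head_relation ++ "(X,Y)"
  let out :=
    match body_atoms with
    | [] => out
    | a0 :: rest =>
      let st := rest.foldl pvStep (out ++ " :- ", "X", 90, a0)
      st.1 ++ (if PySem.Str.startswith st.2.2.2 "inv_" then
          PySem.Str.slice st.2.2.2 (some 4) none ++ "(Y," ++ st.2.1 ++ ")"
        else st.2.2.2 ++ "(" ++ st.2.1 ++ ",Y)")
  out ++ "."

-- ===== PRECONDITION & SPEC =====
def Spec_format_prolog_rule (head_relation : String) (body_atoms : List String) (out : String) : Prop := out = format_prolog_rule_alt head_relation body_atoms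
instance (head_relation : String) (body_atoms : List String) (out : String) : Decidable (Spec_format_prolog_rule head_relation body_atoms out) := by unfold Spec_format_prolog_rule; infer_instance

-- ===== CLAIM (what is proved, stated in full; the proofs are below) =====
def Claim_equal_format_prolog_rule : Prop := ∀ (head_relation : String) (body_atoms : List String), Dom_format_prolog_rule head_relation body_atoms → Spec_format_prolog_rule head_relation body_atoms (format_prolog_rule head_relation body_atoms)

-- ===== LEMMAS AND PROOFS =====

-- A's loop body as a one-part function (proof helper)
def pvAPart (n : Int) (p : Int × String) : String :=
  let i := p.1
  let atom := p.2
  let current_var := if i = 0 then "X" else String.ofList [Char.ofNat (90 + i - 1).toNat]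
  let next_var := if i = n - 1 then "Y" else String.ofList [Char.ofNat (90 + i).toNat]
  if PySem.Str.startswith atom "inv_" then
    PySem.Str.slice atom (some 4) none ++ "(" ++ next_var ++ "," ++ current_var ++ ")"
  else
    atom ++ "(" ++ current_var ++ "," ++ next_var ++ ")"

theorem foldl_push {a : Type} (g : a -> String) : forall (l : List a) (acc : List String),
    l.foldl (fun acc x => acc ++ [g x]) acc = acc ++ l.map g := by
  intro l
  induction l with
  | nil => simp
  | cons x xs ih => intro acc; simp [ih]

theorem abody_eq (n : Int) :
    (fun (acc : List String) (p : Int × String) =>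
      let i := p.1
      let atom := p.2
      let current_var := if i = 0 then "X" else String.ofList [Char.ofNat (90 + i - 1).toNat]
      let next_var := if i = n - 1 then "Y" else String.ofList [Char.ofNat (90 + i).toNat]
      if PySem.Str.startswith atom "inv_" then
        acc ++ [PySem.Str.slice atom (some 4) none ++ "(" ++ next_var ++ "," ++ current_var ++ ")"]
      else
        acc ++ [atom ++ "(" ++ current_var ++ "," ++ next_var ++ ")"])
    = fun acc p => acc ++ [pvAPart n p] := by
  funext acc p
  simp only [pvAPart]
  split <;> simp [*]

-- the variable name at chain position i (of n atoms): X, Z, W, ..., Y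
def pvVar (n i : Nat) : String :=
  if i = 0 then "X" else if i = n then "Y" else String.ofList [Char.ofNat (90 + i - 1)]

theorem str_eq_of_toList {s t : String} (h : s.toList = t.toList) : s = t := by
  have := congrArg String.ofList h
  simpa using this

theorem join_single (x : String) : PySem.Str.join ", " [x] = x := by
  apply str_eq_of_toList
  simp [PySem.Str.join, PySem.Chars.join, List.intercalate]

theorem join_cons (x y : String) (ys : List String) :
    PySem.Str.join ", " (x :: y :: ys) = x ++ ", " ++ PySem.Str.join ", " (y :: ys) := by
  apply str_eq_of_toList
  simp [PySem.Str.join, PySem.Chars.join, List.intercalate]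

-- proof helper: the final-emit expression of Source B applied to the loop state
def pvFinish (st : String × String × Nat × String) : String :=
  st.1 ++ (if PySem.Str.startswith st.2.2.2 "inv_" then
      PySem.Str.slice st.2.2.2 (some 4) none ++ "(Y," ++ st.2.1 ++ ")"
    else st.2.2.2 ++ "(" ++ st.2.1 ++ ",Y)")

theorem final_emit_eq (n : Nat) (i : Nat) (prev : String) (hi : i + 1 = n) :
    (if PySem.Str.startswith prev "inv_" then
        PySem.Str.slice prev (some 4) none ++ "(Y," ++ pvVar n i ++ ")"
      else prev ++ "(" ++ pvVar n i ++ ",Y)")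
    = pvAPart (n : Int) ((i : Nat), prev) := by
  have hlast : (((i : Nat) : Int) = (n : Int) - 1) = True := eq_true (by omega)
  by_cases h0 : i = 0
  · subst h0
    have h1 : ((0 : Int) = (n : Int) - 1) = True := eq_true (by omega)
    simp only [pvAPart, pvVar, Nat.cast_zero, h1, if_true]
    split <;> (apply str_eq_of_toList; simp)
  · have h0' : (((i : Nat) : Int) = 0) = False := eq_false (by omega)
    have hn' : (i = n) = False := eq_false (by omega)
    have ht : ((90 : Int) + (i : Nat) - 1).toNat = 90 + i - 1 := by omega
    simp only [pvAPart, pvVar, hlast, h0, h0', hn', ht, if_true, if_false]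
    split <;> (apply str_eq_of_toList; simp)

theorem mid_emit_eq (n : Nat) (i : Nat) (prev : String) (hi : i + 1 < n) :
    (if PySem.Str.startswith prev "inv_" then
        PySem.Str.slice prev (some 4) none ++ "(" ++ String.ofList [Char.ofNat (90 + i)] ++ "," ++ pvVar n i ++ "), "
      else prev ++ "(" ++ pvVar n i ++ "," ++ String.ofList [Char.ofNat (90 + i)] ++ "), ")
    = pvAPart (n : Int) ((i : Nat), prev) ++ ", " := by
  have hnxt : (((i : Nat) : Int) = (n : Int) - 1) = False := eq_false (by omega)
  have hB : ((90 : Int) + (i : Nat)).toNat = 90 + i := by omega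
  by_cases h0 : i = 0
  · subst h0
    have h1 : ((0 : Int) = (n : Int) - 1) = False := eq_false (by omega)
    simp only [pvAPart, pvVar, Nat.cast_zero, h1,  if_true, if_false]
    split <;> (apply str_eq_of_toList; simp)
  · have h0' : (((i : Nat) : Int) = 0) = False := eq_false (by omega)
    have hn' : (i = n) = False := eq_false (by omega)
    have ht : ((90 : Int) + (i : Nat) - 1).toNat = 90 + i - 1 := by omega
    simp only [pvAPart, pvVar, hnxt, hB, h0, h0', hn', ht,  if_false]
    split <;> (apply str_eq_of_toList; simp)

-- main invariant: finishing the fold from position i equals out ++ the join of A's remaining parts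
theorem fold_eq (n : Nat) : ∀ (rest : List String) (i : Nat) (out prev : String),
    rest.length + i + 1 = n →
    pvFinish (rest.foldl pvStep (out, pvVar n i, 90 + i, prev))
      = out ++ PySem.Str.join ", " ((PySem.List.enumerate (prev :: rest) (i : Int)).map (pvAPart (n : Int))) := by
  intro rest
  induction rest with
  | nil =>
    intro i out prev hn
    rw [List.foldl_nil, PySem.List.enumerate_cons, PySem.List.enumerate_nil, List.map_cons,
        List.map_nil, join_single]
    show out ++ _ = _
    rw [final_emit_eq n i prev (by simpa using hn)]
  | cons b r ih =>
    intro i out prev hn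
    rw [List.foldl_cons]
    have hv : pvVar n (i + 1) = String.ofList [Char.ofNat (90 + i)] := by
      have h1 : (i + 1 = 0) = False := eq_false (by omega)
      have h2 : (i + 1 = n) = False := eq_false (by simp at hn; omega)
      simp [pvVar,  h2]
    have hstep : pvStep (out, pvVar n i, 90 + i, prev) b
        = (out ++ (pvAPart (n : Int) ((i : Nat), prev) ++ ", "), pvVar n (i + 1), 90 + (i + 1), b) := by
      show (out ++ _, String.ofList [Char.ofNat (90 + i)], 90 + i + 1, b) = _
      rw [mid_emit_eq n i prev (by simp at hn; omega), hv]
      rfl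
    rw [hstep, ih (i + 1) _ b (by simp at hn ⊢; omega)]
    rw [PySem.List.enumerate_cons, List.map_cons]
    have hcast : ((i + 1 : Nat) : Int) = (i : Int) + 1 := by push_cast; ring
    rw [hcast]
    cases r with
    | nil =>
      simp only [PySem.List.enumerate_cons, PySem.List.enumerate_nil, List.map_cons,
        List.map_nil, join_cons, join_single]
      apply str_eq_of_toList; simp
    | cons c r2 =>
      simp only [PySem.List.enumerate_cons, List.map_cons, join_cons]
      apply str_eq_of_toList; simp

-- ===== VERDICT (by name: the statement is the Claim_ definition above) =====
theorem format_prolog_rule_spec : Claim_equal_format_prolog_rule := by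
  intro h atoms _
  unfold Spec_format_prolog_rule format_prolog_rule format_prolog_rule_alt
  cases atoms with
  | nil =>
    apply str_eq_of_toList; simp
  | cons a rest =>
    simp only [if_neg (by simp : ¬(a :: rest : List String) = [])]
    have hmain : pvFinish (rest.foldl pvStep (h ++ "(X,Y)" ++ " :- ", "X", 90, a))
        = (h ++ "(X,Y)" ++ " :- ") ++ PySem.Str.join ", "
            ((PySem.List.enumerate (a :: rest) (0 : Int)).map (pvAPart ((a :: rest).length : Int))) := by
      have := fold_eq (a :: rest).length rest 0 (h ++ "(X,Y)" ++ " :- ") a (by simp)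
      rw [show pvVar (a :: rest).length 0 = "X" from by simp [pvVar],
          show ((0 : Nat) : Int) = (0 : Int) from rfl] at this
      exact this
    cases rest with
    | nil =>
      simp only [List.length_cons, List.length_nil, List.headD]
      have h1 := hmain
      rw [PySem.List.enumerate_cons, PySem.List.enumerate_nil, List.map_cons, List.map_nil,
          join_single] at h1
      show _ = pvFinish (List.foldl pvStep (h ++ "(X,Y)" ++ " :- ", "X", 90, a) []) ++ "."
      rw [h1]
      by_cases hs : PySem.Str.startswith a "inv_"
      · have h2 : ((0 : Int) = (1 : Int) - 1) = True := eq_true (by omega)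
        simp only [pvAPart, hs, if_true]
        apply str_eq_of_toList; simp
      · have h2 : ((0 : Int) = (1 : Int) - 1) = True := eq_true (by omega)
        simp only [pvAPart, hs, Bool.false_eq_true, if_false]
        apply str_eq_of_toList; simp
    | cons b rest2 =>
      have hlen : ¬((a :: b :: rest2 : List String).length = 1) := by simp
      simp only [if_neg hlen]
      rw [abody_eq, foldl_push, List.nil_append]
      show _ = pvFinish (List.foldl pvStep (h ++ "(X,Y)" ++ " :- ", "X", 90, a) (b :: rest2)) ++ "."
      rw [hmain]
      apply str_eq_of_toList; simp
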